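-- pv_equiv track=rewrite | github.com/illuzen/poetry | src/python/clustering_demo.py | get_L2_keyword_distance_pair
-- ===== SOURCE A (Python) =====
-- def get_L2_keyword_distance_pair(keyword_frequency_1, keyword_frequency_2):
-- 	# get union of keys
-- 	keys = list(set(keyword_frequency_1.keys()) | set(keyword_frequency_2.keys()))
--
-- 	square_sum = 0
-- 	for keyword in keys:
-- 		if keyword not in keyword_frequency_1.keys():
-- 			square_sum += keyword_frequency_2[keyword] ** 2
-- 		elif keyword not in keyword_frequency_2.keys():
-- 			square_sum += keyword_frequency_1[keyword] ** 2
-- 		else: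
-- 			square_sum += (keyword_frequency_1[keyword] - \
-- 						   keyword_frequency_2[keyword]) ** 2
--
-- 	return square_sum
-- ===== SOURCE B (Python) =====
-- def get_L2_keyword_distance_pair(keyword_frequency_1, keyword_frequency_2):
--     # (v1-v2)^2 = v1^2 - 2*v1*v2 + v2^2: sum the squares of each dict's values,
--     # subtract twice the cross products over the keys present in both dicts.
--     square_sum = sum(v * v for v in keyword_frequency_1.values())
--     square_sum += sum(v * v for v in keyword_frequency_2.values())
--     cross = sum(v * keyword_frequency_2[k]
--                 for k, v in keyword_frequency_1.items()
--                 if k in keyword_frequency_2)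
--     return square_sum - 2 * cross
-- ===== Notes on version B (the rewrite author's own statement) =====
-- stated objective: alternative
-- what changed: B uses the algebraic expansion (v1-v2)^2 = v1^2 - 2*v1*v2 + v2^2: it sums squares of each dict's values and subtracts twice the cross products over the key intersection, never building the key union or branching per key as A does.
import Mathlib
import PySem

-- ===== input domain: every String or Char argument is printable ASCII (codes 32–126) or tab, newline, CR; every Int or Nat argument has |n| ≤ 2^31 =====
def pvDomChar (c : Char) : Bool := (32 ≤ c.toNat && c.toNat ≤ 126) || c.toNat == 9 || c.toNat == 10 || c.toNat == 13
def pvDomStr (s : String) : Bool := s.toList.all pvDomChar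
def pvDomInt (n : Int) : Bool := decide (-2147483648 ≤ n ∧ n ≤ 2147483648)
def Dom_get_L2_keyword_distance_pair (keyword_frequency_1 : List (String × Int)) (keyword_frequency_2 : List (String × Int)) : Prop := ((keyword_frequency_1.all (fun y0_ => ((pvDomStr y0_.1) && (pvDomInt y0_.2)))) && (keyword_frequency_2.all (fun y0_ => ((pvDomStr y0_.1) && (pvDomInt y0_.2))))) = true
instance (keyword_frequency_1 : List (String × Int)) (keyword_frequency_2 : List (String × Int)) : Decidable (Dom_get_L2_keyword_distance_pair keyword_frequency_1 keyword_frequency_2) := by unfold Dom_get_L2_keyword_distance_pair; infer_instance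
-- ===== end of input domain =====

-- B replaces A's per-key branching over the key union by the algebraic expansion
-- (v1-v2)^2 = v1^2 - 2*v1*v2 + v2^2: sums of squares of each dict's values minus
-- twice the cross products over the key intersection (objective: alternative).

-- ===== PORT A =====
-- The Python iterates over list(set(keys1) | set(keys2)); its hash order is not modelled,
-- but the integer sum is order-independent, so folding in the Set's own order is exact.
-- d[k] inside a branch that guarantees k is present is ported as getD _ k 0 (exact there).
def get_L2_keyword_distance_pair (keyword_frequency_1 : List (String × Int)) (keyword_frequency_2 : List (String × Int)) : Int :=
  let d1 : PySem.Dict String Int := PySem.Dict.mk keyword_frequency_1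
  let d2 : PySem.Dict String Int := PySem.Dict.mk keyword_frequency_2
  let keys : PySem.Set String := PySem.Set.union (PySem.Set.ofList d1.keys) d2.keys
  keys.foldl (fun square_sum keyword =>
    if ¬ d1.contains keyword then
      square_sum + (d2.getD keyword 0) ^ 2
    else if ¬ d2.contains keyword then
      square_sum + (d1.getD keyword 0) ^ 2
    else
      square_sum + (d1.getD keyword 0 - d2.getD keyword 0) ^ 2) 0

-- ===== PORT B =====
def get_L2_keyword_distance_pair_alt (keyword_frequency_1 : List (String × Int)) (keyword_frequency_2 : List (String × Int)) : Int :=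
  let d1 : PySem.Dict String Int := PySem.Dict.mk keyword_frequency_1
  let d2 : PySem.Dict String Int := PySem.Dict.mk keyword_frequency_2
  let square_sum := (d1.values.map (fun v => v * v)).sum + (d2.values.map (fun v => v * v)).sum
  let cross := ((d1.items.filter (fun kv => d2.contains kv.1)).map (fun kv => kv.2 * d2.getD kv.1 0)).sum
  square_sum - 2 * cross

-- ===== PRECONDITION & SPEC =====
-- Pre_ excludes association lists with duplicate keys: they do not represent a Python
-- dict (dict construction collapses duplicates), so neither program is specified there.
def pvNoDupKeys (l : List (String × Int)) : Bool :=
  (l.map Prod.fst) == PySem.Set.ofList (l.map Prod.fst)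
def Pre_get_L2_keyword_distance_pair (keyword_frequency_1 : List (String × Int)) (keyword_frequency_2 : List (String × Int)) : Prop :=
  (pvNoDupKeys keyword_frequency_1 && pvNoDupKeys keyword_frequency_2) = true
instance (keyword_frequency_1 : List (String × Int)) (keyword_frequency_2 : List (String × Int)) : Decidable (Pre_get_L2_keyword_distance_pair keyword_frequency_1 keyword_frequency_2) := by unfold Pre_get_L2_keyword_distance_pair; infer_instance
def pvWitness_get_L2_keyword_distance_pair : (List (String × Int)) × (List (String × Int)) :=
  ([("a", 1), ("b", 2)], [("b", 3), ("c", -4)])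
def Spec_get_L2_keyword_distance_pair (keyword_frequency_1 : List (String × Int)) (keyword_frequency_2 : List (String × Int)) (out : Int) : Prop := out = get_L2_keyword_distance_pair_alt keyword_frequency_1 keyword_frequency_2
instance (keyword_frequency_1 : List (String × Int)) (keyword_frequency_2 : List (String × Int)) (out : Int) : Decidable (Spec_get_L2_keyword_distance_pair keyword_frequency_1 keyword_frequency_2 out) := by unfold Spec_get_L2_keyword_distance_pair; infer_instance

-- ===== CLAIM (what is proved, stated in full; the proofs are below) =====
def Claim_equal_get_L2_keyword_distance_pair : Prop := ∀ (keyword_frequency_1 : List (String × Int)) (keyword_frequency_2 : List (String × Int)), Dom_get_L2_keyword_distance_pair keyword_frequency_1 keyword_frequency_2 → Pre_get_L2_keyword_distance_pair keyword_frequency_1 keyword_frequency_2 → Spec_get_L2_keyword_distance_pair keyword_frequency_1 keyword_frequency_2 (get_L2_keyword_distance_pair keyword_frequency_1 keyword_frequency_2)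

-- ===== LEMMAS AND PROOFS =====

-- (l.filter p).map f summed = full map summed, when f vanishes where p fails
theorem pv_sum_map_filter {α : Type} (p : α → Bool) (f : α → Int) (l : List α)
    (h : ∀ x ∈ l, p x = false → f x = 0) :
    ((l.filter p).map f).sum = (l.map f).sum := by
  induction l with
  | nil => simp
  | cons a t ih =>
    simp only [List.filter_cons, List.map_cons, List.sum_cons]
    have ht := ih (fun x hx => h x (List.mem_cons_of_mem _ hx))
    cases hpa : p a with
    | true => simp [ht]
    | false => simp [ht, h a (List.mem_cons_self) hpa]

-- a Nodup key list's sum of h over a superset key list K equals the sum over its own keys,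
-- provided h vanishes on K outside it
theorem pv_sum_keys_ext (K l : List String) (hK : K.Nodup) (hl : l.Nodup)
    (hsub : ∀ k ∈ l, k ∈ K) (h : String → Int)
    (hzero : ∀ k ∈ K, k ∉ l → h k = 0) :
    (K.map h).sum = (l.map h).sum := by
  rw [← List.sum_toFinset h hK, ← List.sum_toFinset h hl]
  refine (Finset.sum_subset ?_ ?_).symm
  · intro k hk
    exact List.mem_toFinset.mpr (hsub k (List.mem_toFinset.mp hk))
  · intro k hk hnk
    exact hzero k (List.mem_toFinset.mp hk) (fun hm => hnk (List.mem_toFinset.mpr hm))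

theorem get_L2_proof (kf1 kf2 : List (String × Int))
    (h1 : (kf1.map Prod.fst).Nodup) (h2 : (kf2.map Prod.fst).Nodup) :
    get_L2_keyword_distance_pair kf1 kf2 = get_L2_keyword_distance_pair_alt kf1 kf2 := by
  unfold get_L2_keyword_distance_pair get_L2_keyword_distance_pair_alt
  dsimp only
  set d1 : PySem.Dict String Int := PySem.Dict.mk kf1 with hd1
  set d2 : PySem.Dict String Int := PySem.Dict.mk kf2 with hd2
  have hk1 : d1.keys = kf1.map Prod.fst := rfl
  have hk2 : d2.keys = kf2.map Prod.fst := rfl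
  set K : List String := PySem.Set.union (PySem.Set.ofList d1.keys) d2.keys with hKdef
  have hKnodup : K.Nodup := PySem.Set.nodup_union _ _ (PySem.Set.nodup_ofList _)
  have hmemK : ∀ k, k ∈ K ↔ k ∈ d1.keys ∨ k ∈ d2.keys := by
    intro k
    rw [hKdef, PySem.Set.mem_union, PySem.Set.mem_ofList]
  -- contains ↔ key-list membership
  have hcont1 : ∀ k, d1.contains k = true ↔ k ∈ kf1.map Prod.fst := by
    intro k
    rw [PySem.Dict.contains_eq_decide_mem_keys, hk1, decide_eq_true_iff]
  have hcont2 : ∀ k, d2.contains k = true ↔ k ∈ kf2.map Prod.fst := by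
    intro k
    rw [PySem.Dict.contains_eq_decide_mem_keys, hk2, decide_eq_true_iff]
  -- lookups vanish outside the own key list
  have hz1 : ∀ k, k ∉ kf1.map Prod.fst → d1.getD k 0 = 0 := by
    intro k hk
    have hc : d1.contains k = false := by
      rw [PySem.Dict.contains_eq_decide_mem_keys, hk1]; exact decide_eq_false hk
    exact PySem.Dict.getD_of_not_contains _ 0 hc
  have hz2 : ∀ k, k ∉ kf2.map Prod.fst → d2.getD k 0 = 0 := by
    intro k hk
    have hc : d2.contains k = false := by
      rw [PySem.Dict.contains_eq_decide_mem_keys, hk2]; exact decide_eq_false hk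
    exact PySem.Dict.getD_of_not_contains _ 0 hc
  -- A's fold = sum of (lookup1 - lookup2)^2 over K
  have hbody : K.foldl (fun square_sum keyword =>
      if ¬ d1.contains keyword then square_sum + (d2.getD keyword 0) ^ 2
      else if ¬ d2.contains keyword then square_sum + (d1.getD keyword 0) ^ 2
      else square_sum + (d1.getD keyword 0 - d2.getD keyword 0) ^ 2) 0
      = K.foldl (fun acc k => acc + (d1.getD k 0 - d2.getD k 0) ^ 2) 0 := by
    apply PySem.List.foldl_congr_mem
    intro acc k _
    by_cases hc1 : d1.contains k = true
    · by_cases hc2 : d2.contains k = true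
      · rw [if_neg (fun h => h hc1), if_neg (fun h => h hc2)]
      · have h20 : d2.getD k 0 = 0 :=
          hz2 k (fun hm => hc2 ((hcont2 k).mpr hm))
        rw [if_neg (fun h => h hc1), if_pos hc2, h20]
        ring
    · have h10 : d1.getD k 0 = 0 :=
        hz1 k (fun hm => hc1 ((hcont1 k).mpr hm))
      rw [if_pos hc1, h10]
      ring
  rw [hbody, PySem.List.foldl_add (g := fun k => (d1.getD k 0 - d2.getD k 0) ^ 2)]
  have hv1 : d1.values = kf1.map Prod.snd := rfl
  have hv2 : d2.values = kf2.map Prod.snd := rfl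
  have hit1 : d1.items = kf1 := rfl
  -- an entry's value is the lookup of its key (Nodup keys)
  have hlook1 : ∀ p ∈ kf1, p.2 = d1.getD p.1 0 := by
    intro p hp
    exact (PySem.Dict.getD_of_mem_items (d := d1) (k := p.1) (v := p.2)
      (by simpa [hit1] using hp) (by simpa [hk1] using h1) 0).symm
  have hlook2 : ∀ p ∈ kf2, p.2 = d2.getD p.1 0 := by
    intro p hp
    exact (PySem.Dict.getD_of_mem_items (d := d2) (k := p.1) (v := p.2)
      (by simpa using hp) (by simpa [hk2] using h2) 0).symm
  -- each of B's three sums as a sum over K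
  have hs1 : (d1.values.map (fun v => v * v)).sum
      = (K.map (fun k => d1.getD k 0 * d1.getD k 0)).sum := by
    rw [hv1, List.map_map]
    have he : kf1.map ((fun v => v * v) ∘ Prod.snd)
        = (kf1.map Prod.fst).map (fun k => d1.getD k 0 * d1.getD k 0) := by
      rw [List.map_map]
      exact List.map_congr_left (fun p hp => by
        show p.2 * p.2 = d1.getD p.1 0 * d1.getD p.1 0
        rw [hlook1 p hp])
    rw [he]
    exact (pv_sum_keys_ext K (kf1.map Prod.fst) hKnodup h1
      (fun k hk => (hmemK k).mpr (Or.inl (by simpa [hk1] using hk)))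
      (fun k => d1.getD k 0 * d1.getD k 0)
      (fun k _ hk => by show d1.getD k 0 * d1.getD k 0 = 0; rw [hz1 k hk]; ring)).symm
  have hs2 : (d2.values.map (fun v => v * v)).sum
      = (K.map (fun k => d2.getD k 0 * d2.getD k 0)).sum := by
    rw [hv2, List.map_map]
    have he : kf2.map ((fun v => v * v) ∘ Prod.snd)
        = (kf2.map Prod.fst).map (fun k => d2.getD k 0 * d2.getD k 0) := by
      rw [List.map_map]
      exact List.map_congr_left (fun p hp => by
        show p.2 * p.2 = d2.getD p.1 0 * d2.getD p.1 0
        rw [hlook2 p hp])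
    rw [he]
    exact (pv_sum_keys_ext K (kf2.map Prod.fst) hKnodup h2
      (fun k hk => (hmemK k).mpr (Or.inr (by simpa [hk2] using hk)))
      (fun k => d2.getD k 0 * d2.getD k 0)
      (fun k _ hk => by show d2.getD k 0 * d2.getD k 0 = 0; rw [hz2 k hk]; ring)).symm
  have hcross : ((d1.items.filter (fun kv => d2.contains kv.1)).map
        (fun kv => kv.2 * d2.getD kv.1 0)).sum
      = (K.map (fun k => d1.getD k 0 * d2.getD k 0)).sum := by
    rw [hit1]
    rw [pv_sum_map_filter (fun kv => d2.contains kv.1) (fun kv => kv.2 * d2.getD kv.1 0) kf1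
      (fun p _ hpc => by
        have hpc' : d2.contains p.1 = false := hpc
        show p.2 * d2.getD p.1 0 = 0
        rw [hz2 p.1 (fun hm => by
          rw [(hcont2 p.1).mpr hm] at hpc'; exact absurd hpc' (by decide))]
        ring)]
    have he : kf1.map (fun kv => kv.2 * d2.getD kv.1 0)
        = (kf1.map Prod.fst).map (fun k => d1.getD k 0 * d2.getD k 0) := by
      rw [List.map_map]
      exact List.map_congr_left (fun p hp => by
        show p.2 * d2.getD p.1 0 = d1.getD p.1 0 * d2.getD p.1 0
        rw [hlook1 p hp])
    rw [he]
    exact (pv_sum_keys_ext K (kf1.map Prod.fst) hKnodup h1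
      (fun k hk => (hmemK k).mpr (Or.inl (by simpa [hk1] using hk)))
      (fun k => d1.getD k 0 * d2.getD k 0)
      (fun k _ hk => by show d1.getD k 0 * d2.getD k 0 = 0; rw [hz1 k hk]; ring)).symm
  rw [hs1, hs2, hcross]
  -- pure algebra on sums over the same index list K
  rw [← List.sum_toFinset _ hKnodup, ← List.sum_toFinset _ hKnodup,
      ← List.sum_toFinset _ hKnodup, ← List.sum_toFinset _ hKnodup]
  rw [← Finset.sum_add_distrib, Finset.mul_sum, ← Finset.sum_sub_distrib, zero_add]
  exact Finset.sum_congr rfl (fun k _ => by ring)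

-- ===== VERDICT (by name: the statement is the Claim_ definition above) =====
theorem pvNoDupKeys_nodup (l : List (String × Int)) (h : pvNoDupKeys l = true) :
    (l.map Prod.fst).Nodup := by
  unfold pvNoDupKeys at h
  have he : l.map Prod.fst = PySem.Set.ofList (l.map Prod.fst) := by
    exact eq_of_beq h
  rw [he]
  exact PySem.Set.nodup_ofList _

theorem get_L2_keyword_distance_pair_spec : Claim_equal_get_L2_keyword_distance_pair := by
  intro kf1 kf2 _ hpre
  unfold Pre_get_L2_keyword_distance_pair at hpre
  rw [Bool.and_eq_true] at hpre
  exact get_L2_proof kf1 kf2 (pvNoDupKeys_nodup _ hpre.1) (pvNoDupKeys_nodup _ hpre.2)
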